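-- pv_equiv track=rewrite | github.com/guildai/guildai | guild/plugins/keras_op_main.py | _pop_const_args
-- ===== SOURCE A (Python) =====
-- def _pop_const_args(args0):
--     args = []
--     skip_next = False
--     for val in args0:
--         if skip_next:
--             skip_next = False
--             continue
--         if val.startswith("--const:"):
--             if "=" not in val:
--                 skip_next = True
--             continue
--         args.append(val)
--     return args
-- ===== SOURCE B (Python) =====
-- def _pop_const_args(args0):
--     # Stage 1: mark every position to drop in a boolean mask (a flag itself,
--     # and the position after a valueless, not-already-dropped flag).
--     drop = [False] * len(args0)
--     for i, val in enumerate(args0):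
--         if not drop[i] and val.startswith("--const:"):
--             drop[i] = True
--             if "=" not in val and i + 1 < len(args0):
--                 drop[i + 1] = True
--     # Stage 2: keep the unmarked elements.
--     return [val for val, d in zip(args0, drop) if not d]
-- ===== Notes on version B (the rewrite author's own statement) =====
-- stated objective: alternative
-- what changed: Replaces A's single pass with a skip_next flag by two stages: first build a boolean drop-mask (marking each flag and the position after a valueless unmarked flag), then filter args0 against the mask with zip.
import Mathlib
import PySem

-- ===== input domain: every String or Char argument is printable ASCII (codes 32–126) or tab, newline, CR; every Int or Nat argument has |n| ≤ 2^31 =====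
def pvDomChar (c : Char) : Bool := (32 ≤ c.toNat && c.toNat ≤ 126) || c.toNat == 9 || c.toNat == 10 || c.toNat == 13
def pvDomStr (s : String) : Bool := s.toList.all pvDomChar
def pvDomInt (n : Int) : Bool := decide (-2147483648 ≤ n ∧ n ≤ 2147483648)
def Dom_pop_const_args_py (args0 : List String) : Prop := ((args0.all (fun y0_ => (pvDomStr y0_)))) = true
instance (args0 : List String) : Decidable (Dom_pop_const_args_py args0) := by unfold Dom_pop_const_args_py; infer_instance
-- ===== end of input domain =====

-- B replaces A's skip_next flag threaded through one pass by two stages: build a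
-- boolean drop-mask over the positions, then filter the list against the mask
-- (objective: alternative decomposition/data structure, same cost).


-- ===== PORT A =====
-- the loop body: state is (args, skip_next)
def popConstStep (st : List String × Bool) (val : String) : List String × Bool :=
  if st.2 then (st.1, false)
  else if PySem.Str.startswith val "--const:" then
    if !(PySem.Str.isIn "=" val) then (st.1, true) else (st.1, st.2)
  else (st.1 ++ [val], st.2)

def pop_const_args_py (args0 : List String) : List String :=
  (args0.foldl popConstStep ([], false)).1

-- ===== PORT B =====
-- stage 1: the 'for i, val in enumerate(args0)' loop mutating the drop mask
def markLoop (args0 : List String) (drop : List Bool) (i : Nat) : List Bool :=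
  if h : i < args0.length then
    let val := args0[i]
    if !(drop.getD i false) && PySem.Str.startswith val "--const:" then
      let drop1 := drop.set i true
      let drop2 := if !(PySem.Str.isIn "=" val) && i + 1 < args0.length
                   then drop1.set (i + 1) true else drop1
      markLoop args0 drop2 (i + 1)
    else markLoop args0 drop (i + 1)
  else drop
termination_by args0.length - i
decreasing_by all_goals omega

-- stage 2: the comprehension '[val for val, d in zip(args0, drop) if not d]'
def zipKeep (vs : List String) (ds : List Bool) : List String :=
  ((vs.zip ds).filter (fun p => !p.2)).map Prod.fst

def pop_const_args_py_alt (args0 : List String) : List String :=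
  zipKeep args0 (markLoop args0 (List.replicate args0.length false) 0)

-- ===== PRECONDITION & SPEC =====
def Spec_pop_const_args_py (args0 : List String) (out : List String) : Prop := out = pop_const_args_py_alt args0
instance (args0 : List String) (out : List String) : Decidable (Spec_pop_const_args_py args0 out) := by unfold Spec_pop_const_args_py; infer_instance

-- ===== CLAIM (what is proved, stated in full; the proofs are below) =====
def Claim_equal_pop_const_args_py : Prop := ∀ (args0 : List String), Dom_pop_const_args_py args0 → Spec_pop_const_args_py args0 (pop_const_args_py args0)

-- ===== LEMMAS AND PROOFS =====

-- reference recursion both ports are proved equal to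
def fRef : List String → List String
  | [] => []
  | v :: rest =>
    if PySem.Str.startswith v "--const:" then
      if PySem.Str.isIn "=" v then fRef rest else fRef rest.tail
    else v :: fRef rest
termination_by l => l.length
decreasing_by all_goals (simp [List.length_tail]; try omega)

theorem foldl_popConstStep_eq (l : List String) (acc : List String) :
    (l.foldl popConstStep (acc, false)).1 = acc ++ fRef l := by
  fun_induction fRef l generalizing acc with
  | case1 => simp
  | case2 v rest hsw hin ih =>
      simp only [List.foldl_cons, popConstStep, hsw, hin, Bool.not_true, if_false, if_true,
        Bool.false_eq_true]
      exact ih acc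
  | case3 v rest hsw hin ih =>
      simp only [List.foldl_cons, popConstStep, hsw, hin, Bool.not_false, if_true,
        Bool.false_eq_true, if_false]
      cases rest with
      | nil =>
          have h0 : fRef [] = [] := by rw [fRef]
          simp [h0]
      | cons w rest' =>
          have hstep : (List.foldl popConstStep (acc, true) (w :: rest')).1
              = (List.foldl popConstStep (acc, false) rest').1 := by
            simp [popConstStep]
          rw [hstep, List.tail_cons] at *
          exact ih acc
  | case4 v rest hsw ih =>
      simp only [List.foldl_cons, popConstStep, hsw, Bool.false_eq_true, if_false]
      rw [ih (acc ++ [v])]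
      simp

theorem getD_set_ne (l : List Bool) (i j : Nat) (b : Bool) (h : j ≠ i) :
    (l.set i b).getD j false = l.getD j false := by
  simp [List.getD, List.getElem?_set_ne (by omega : i ≠ j)]

theorem getD_set_self (l : List Bool) (i : Nat) (b : Bool) (h : i < l.length) :
    (l.set i b).getD i false = b := by
  simp [List.getD, h]

theorem getD_eq_get (l : List Bool) (i : Nat) (h : i < l.length) :
    l.getD i false = l[i] := by
  simp [List.getD, List.getElem?_eq_getElem h]

theorem markLoop_length (args0 : List String) (drop : List Bool) (i : Nat) :
    (markLoop args0 drop i).length = drop.length := by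
  fun_induction markLoop args0 drop i with
  | case1 drop i h val hc drop1 drop2 ih =>
      rw [ih]
      simp only [drop2, drop1]
      split <;> simp
  | case2 drop i h val hc ih => exact ih
  | case3 drop i h => rfl

theorem markLoop_getD_lt (args0 : List String) (drop : List Bool) (i j : Nat) (hj : j < i) :
    (markLoop args0 drop i).getD j false = drop.getD j false := by
  fun_induction markLoop args0 drop i with
  | case1 drop i h val hc drop1 drop2 ih =>
      rw [ih (by omega)]
      simp only [drop2, drop1]
      split
      · rw [getD_set_ne _ _ _ _ (by omega), getD_set_ne _ _ _ _ (by omega)]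
      · rw [getD_set_ne _ _ _ _ (by omega)]
  | case2 drop i h val hc ih => exact ih (by omega)
  | case3 drop i h => rfl

theorem zipKeep_nil (ds : List Bool) : zipKeep [] ds = [] := by
  simp [zipKeep]

theorem zipKeep_cons (v : String) (vs : List String) (d : Bool) (ds : List Bool) :
    zipKeep (v :: vs) (d :: ds) = if d then zipKeep vs ds else v :: zipKeep vs ds := by
  simp [zipKeep, List.filter_cons]
  cases d <;> simp

-- the main invariant: from index i on (all positions > i still unmarked), the
-- kept suffix is fRef of the suffix (minus the current element when already marked)
theorem markLoop_suffix (args0 : List String) (drop : List Bool) (i : Nat)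
    (hlen : drop.length = args0.length)
    (hsuf : ∀ j, i < j → drop.getD j false = false) :
    zipKeep (args0.drop i) ((markLoop args0 drop i).drop i) =
      if drop.getD i false then fRef (args0.drop (i + 1)) else fRef (args0.drop i) := by
  fun_induction markLoop args0 drop i with
  | case1 drop i h val hc drop1 drop2 ih =>
      have hparts := (Bool.and_eq_true _ _).mp hc
      have hdi : drop.getD i false = false := by simpa using hparts.1
      have hsw : PySem.Str.startswith args0[i] "--const:" = true := hparts.2
      have hlen2 : drop2.length = args0.length := by
        simp only [drop2, drop1]; split <;> simp [hlen]
      have hd2i : drop2.getD i false = true := by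
        simp only [drop2, drop1]
        split
        · rw [getD_set_ne _ _ _ _ (by omega)]
          exact getD_set_self _ _ _ (by omega)
        · exact getD_set_self _ _ _ (by omega)
      have hres_len : (markLoop args0 drop2 (i+1)).length = args0.length := by
        rw [markLoop_length]; exact hlen2
      have hres_i : (markLoop args0 drop2 (i+1)).getD i false = true := by
        rw [markLoop_getD_lt _ _ _ _ (by omega)]; exact hd2i
      have hargs : args0.drop i = args0[i] :: args0.drop (i+1) :=
        (List.getElem_cons_drop h).symm
      have hires : i < (markLoop args0 drop2 (i+1)).length := by omega
      have hres : (markLoop args0 drop2 (i+1)).drop i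
          = (markLoop args0 drop2 (i+1))[i] :: (markLoop args0 drop2 (i+1)).drop (i+1) :=
        (List.getElem_cons_drop hires).symm
      have hres_i' : (markLoop args0 drop2 (i+1))[i] = true := by
        rw [← getD_eq_get _ _ hires]; exact hres_i
      rw [hargs, hres, hres_i', zipKeep_cons, if_pos rfl, hdi, if_neg (by simp)]
      by_cases hin : PySem.Str.isIn "=" args0[i] = true
      · -- inline '=': only position i marked; suffix behaves as fRef (drop (i+1))
        have hd2 : drop2 = drop.set i true := by
          simp only [drop2, drop1]
          exact dif_neg (by simp only [val, hin, Bool.not_true, Bool.false_and]; simp)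
        have hsuf2 : ∀ j, i + 1 < j → drop2.getD j false = false := by
          intro j hj; rw [hd2, getD_set_ne _ _ _ _ (by omega)]; exact hsuf j (by omega)
        have hd2i1 : drop2.getD (i+1) false = false := by
          rw [hd2, getD_set_ne _ _ _ _ (by omega)]; exact hsuf (i+1) (by omega)
        rw [ih hlen2 hsuf2, hd2i1, if_neg (by simp)]
        conv_rhs => rw [fRef]
        rw [hsw, hin]
        simp
      · have hin' : PySem.Str.isIn "=" args0[i] = false := Bool.eq_false_iff.mpr hin
        by_cases h1 : i + 1 < args0.length
        · -- valueless flag with a following element: positions i and i+1 marked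
          have hd2 : drop2 = (drop.set i true).set (i+1) true := by
            simp only [drop2, drop1]
            exact dif_pos (by
              simp only [val, hin', Bool.not_false, Bool.true_and, decide_eq_true_eq]
              exact h1)
          have hsuf2 : ∀ j, i + 1 < j → drop2.getD j false = false := by
            intro j hj
            rw [hd2, getD_set_ne _ _ _ _ (by omega), getD_set_ne _ _ _ _ (by omega)]
            exact hsuf j (by omega)
          have hd2i1 : drop2.getD (i+1) false = true := by
            rw [hd2]; exact getD_set_self _ _ _ (by simp; omega)
          rw [ih hlen2 hsuf2, hd2i1, if_pos rfl]
          conv_rhs => rw [fRef]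
          rw [hsw, hin']
          simp [List.tail_drop]
        · -- trailing valueless flag: only position i marked, i+1 is past the end
          have hd2 : drop2 = drop.set i true := by
            simp only [drop2, drop1]
            refine dif_neg ?_
            simp only [val, hin', Bool.not_false, Bool.true_and, decide_eq_true_eq]
            exact h1
          have hsuf2 : ∀ j, i + 1 < j → drop2.getD j false = false := by
            intro j hj; rw [hd2, getD_set_ne _ _ _ _ (by omega)]; exact hsuf j (by omega)
          have hd2i1 : drop2.getD (i+1) false = false := by
            rw [hd2, getD_set_ne _ _ _ _ (by omega)]; exact hsuf (i+1) (by omega)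
          rw [ih hlen2 hsuf2, hd2i1, if_neg (by simp)]
          have he : args0.drop (i+1) = [] := List.drop_eq_nil_of_le (by omega)
          have h0 : fRef [] = [] := by rw [fRef]
          rw [he, h0]
          conv_rhs => rw [fRef]
          rw [hsw, hin']
          simp [h0]
  | case2 drop i h val hc ih =>
      have hsuf2 : ∀ j, i + 1 < j → drop.getD j false = false := fun j hj => hsuf j (by omega)
      have hdi1 : drop.getD (i+1) false = false := hsuf (i+1) (by omega)
      have hres_len : (markLoop args0 drop (i+1)).length = args0.length := by
        rw [markLoop_length]; exact hlen
      have hires : i < (markLoop args0 drop (i+1)).length := by omega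
      have hargs : args0.drop i = args0[i] :: args0.drop (i+1) :=
        (List.getElem_cons_drop h).symm
      have hres : (markLoop args0 drop (i+1)).drop i
          = (markLoop args0 drop (i+1))[i] :: (markLoop args0 drop (i+1)).drop (i+1) :=
        (List.getElem_cons_drop hires).symm
      have hres_i : (markLoop args0 drop (i+1))[i] = drop.getD i false := by
        rw [← getD_eq_get _ _ hires]
        exact markLoop_getD_lt args0 drop (i+1) i (by omega)
      rw [hargs, hres, hres_i, zipKeep_cons, ih hlen hsuf2, hdi1,
        if_neg (show ¬(false = true) from by simp)]
      cases hdf : drop.getD i false with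
      | true => simp
      | false =>
          -- element i is not a flag (else the first branch would have fired)
          have hcf : (!drop.getD i false && PySem.Str.startswith args0[i] "--const:") = false :=
            Bool.eq_false_iff.mpr hc
          have hsw : PySem.Str.startswith args0[i] "--const:" = false := by
            rw [hdf] at hcf
            simpa using hcf
          rw [if_neg (by simp), if_neg (by simp)]
          conv_rhs => rw [fRef]
          rw [hsw]
          simp
  | case3 drop i h =>
      have he : args0.drop i = [] := List.drop_eq_nil_of_le (by omega)
      have he1 : args0.drop (i+1) = [] := List.drop_eq_nil_of_le (by omega)
      have h0 : fRef [] = [] := by rw [fRef]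
      rw [he, he1, zipKeep_nil, h0]
      split <;> rfl

-- ===== VERDICT (by name: the statement is the Claim_ definition above) =====
theorem pop_const_args_py_spec : Claim_equal_pop_const_args_py := by
  intro args0 _
  unfold Spec_pop_const_args_py pop_const_args_py pop_const_args_py_alt
  rw [foldl_popConstStep_eq]
  have h := markLoop_suffix args0 (List.replicate args0.length false) 0
    (by simp) (by intro j hj; simp [List.getD])
  cases args0 with
  | nil => simp [zipKeep, markLoop, fRef]
  | cons a l =>
      simp only [List.drop_zero] at h
      rw [h]
      have : (List.replicate (a :: l).length false).getD 0 false = false := by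
        simp [List.getD]
      rw [this, if_neg (by simp)]
      simp
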